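-- pv_equiv track=rewrite | github.com/kitao/pyxel | python/pyxel/gems/bgm_generator.py | _merge_rest_tokens
-- ===== SOURCE A (Python) =====
-- from typing import Dict, List, Optional, Sequence, Tuple
--
-- def _length_units_to_tokens(units: int) -> List[str]:
--     table = [
--         (16, "1"),
--         (12, "2."),
--         (8, "2"),
--         (6, "4."),
--         (4, "4"),
--         (3, "8."),
--         (2, "8"),
--         (1, "16"),
--     ]
--     tokens: List[str] = []
--     remaining = units
--     for u, token in table:
--         while remaining >= u:
--             tokens.append(token)
--             remaining -= u
--         if remaining == 0:
--             break
--     return tokens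
--
-- def _length_token_to_units(token: str) -> int:
--     base = {"1": 16, "2": 8, "4": 4, "8": 2, "16": 1}
--     if not token:
--         return 0
--     dotted = token.endswith(".")
--     core = token[:-1] if dotted else token
--     units = base.get(core, 0)
--     if dotted:
--         units += units // 2
--     return units
--
-- def _note_token(note_str: str, units: int, tie_out: bool, default_len: str) -> str:
--     lens = _length_units_to_tokens(units)
--     length_head = "" if lens[0] == default_len else lens[0]
--     token = f"{note_str}{length_head}" + "".join(f"&{tok}" for tok in lens[1:])
--     if tie_out:
--         token += "&"
--     return token
--
-- def _merge_rest_tokens(tokens: List[str], default_len: str) -> List[str]: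
--     merged: List[str] = []
--     rest_units = 0
--     for tok in tokens + ["__END__"]:
--         is_rest = tok.startswith("R")
--         if is_rest:
--             tail = tok[1:]
--             parts = tail.split("&") if tail else [""]
--             total = 0
--             for part in parts:
--                 part_len = part if part else default_len
--                 total += _length_token_to_units(part_len)
--             rest_units += total
--             continue
--         if rest_units:
--             merged.append(_note_token("R", rest_units, False, default_len))
--             rest_units = 0
--         if tok != "__END__":
--             merged.append(tok)
--     return merged
-- ===== SOURCE B (Python) =====
-- from typing import List
--
-- # Precomputed unit values for every length token (dotted forms included).
-- _UNITS = {"1": 16, "1.": 24, "2": 8, "2.": 12, "4": 4, "4.": 6,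
--           "8": 2, "8.": 3, "16": 1, "16.": 1}
--
-- # Greedy token decomposition of every remainder 0..15 (units // 16 gives the "1"s).
-- _REM = [[], ["16"], ["8"], ["8."], ["4"], ["4", "16"], ["4."], ["4.", "16"],
--         ["2"], ["2", "16"], ["2", "8"], ["2", "8."], ["2."], ["2.", "16"],
--         ["2.", "8"], ["2.", "8."]]
--
-- def _rest_note(total: int, default_len: str) -> str:
--     q, r = divmod(total, 16)
--     lens = ["1"] * q + _REM[r]
--     parts = [("" if lens[0] == default_len else lens[0])] + lens[1:]
--     return "R" + "&".join(parts)
--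
-- def _merge_rest_tokens(tokens: List[str], default_len: str) -> List[str]:
--     # Two-index group scan: each maximal run of rest tokens is summed locally
--     # (table lookup per part) and emitted once via a closed-form divmod note.
--     out: List[str] = []
--     i, n = 0, len(tokens)
--     while i < n:
--         t = tokens[i]
--         if not t.startswith("R"):
--             out.append(t)
--             i += 1
--             continue
--         total = 0
--         while i < n and tokens[i].startswith("R"):
--             for p in tokens[i][1:].split("&"):
--                 total += _UNITS.get(p or default_len, 0)
--             i += 1
--         if total:
--             out.append(_rest_note(total, default_len))
--     return out
-- ===== Notes on version B (the rewrite author's own statement) =====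
-- stated objective: alternative
-- what changed: Replaces the sentinel-plus-running-accumulator loop (appending '__END__' and recomputing each token's units via dotted-suffix arithmetic and a greedy while-loop table) with a two-index group scan that sums each maximal rest run locally via a precomputed per-token unit table and emits it once through a closed-form divmod note builder; B treats a literal '__END__' input token as an ordinary token instead of silently dropping it.
-- intended difference: On inputs whose token list contains the literal string '__END__', A drops that token (and flushes pending rests at it) because it collides with A's internal sentinel; B keeps it as an ordinary non-rest token, which is the intended behaviour since '__END__' is not meant to be meaningful input. — e.g. on _merge_rest_tokens(["__END__"], "4"): A returns [], B returns ["__END__"]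
import Mathlib
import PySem

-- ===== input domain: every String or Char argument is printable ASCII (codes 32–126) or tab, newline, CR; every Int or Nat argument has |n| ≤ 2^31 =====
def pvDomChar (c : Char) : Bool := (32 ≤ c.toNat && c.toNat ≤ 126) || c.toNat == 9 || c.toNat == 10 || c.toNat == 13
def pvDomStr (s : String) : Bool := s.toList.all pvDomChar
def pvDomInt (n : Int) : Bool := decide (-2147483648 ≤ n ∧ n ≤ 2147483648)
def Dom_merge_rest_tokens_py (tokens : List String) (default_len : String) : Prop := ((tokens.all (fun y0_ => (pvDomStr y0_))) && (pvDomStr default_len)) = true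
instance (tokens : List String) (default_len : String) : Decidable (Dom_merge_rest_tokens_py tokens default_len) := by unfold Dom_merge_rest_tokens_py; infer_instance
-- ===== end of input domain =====

-- B replaces A's sentinel-plus-running-accumulator loop by a two-index group scan over maximal
-- rest runs, with a precomputed per-token unit table and a closed-form divmod note builder
-- (objective: alternative decomposition, same cost).

-- ===== PORT A =====
-- the inner `while remaining >= u` loop of _length_units_to_tokens;
-- fuel = remaining.toNat only makes the while total (each call site has u ≥ 1, so it is exact)
def pvWhileGe (u : Int) (token : String) : Nat → Int → List String → (List String × Int)
  | 0, remaining, toks => (toks, remaining)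
  | fuel + 1, remaining, toks =>
    if u ≤ remaining then pvWhileGe u token fuel (remaining - u) (toks ++ [token])
    else (toks, remaining)

-- `for u, token in table: … if remaining == 0: break`
def pvTableGo : List (Int × String) → Int → List String → List String
  | [], _, toks => toks
  | (u, token) :: rest, remaining, toks =>
    let (toks, remaining) := pvWhileGe u token remaining.toNat remaining toks
    if remaining = 0 then toks else pvTableGo rest remaining toks

-- _length_units_to_tokens
def pvLenUnitsToTokens (units : Int) : List String :=
  pvTableGo [(16, "1"), (12, "2."), (8, "2"), (6, "4."), (4, "4"), (3, "8."), (2, "8"), (1, "16")] units []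

-- the local dict `base` of _length_token_to_units
def pvBase : PySem.Dict String Int :=
  PySem.Dict.ofList [("1", (16 : Int)), ("2", 8), ("4", 4), ("8", 2), ("16", 1)]

-- _length_token_to_units
def pvLenTokenToUnits (token : String) : Int :=
  if token = "" then 0
  else
    let dotted := PySem.Str.endswith token "."
    let core := if dotted then PySem.Str.slice token none (some (-1)) else token
    let units := pvBase.getD core 0
    if dotted then units + PySem.Int.floordiv units 2 else units

-- _note_token; lens[0] is total via headD "" (every call site passes units > 0, so lens ≠ [])
def pvNoteToken (note_str : String) (units : Int) (tie_out : Bool) (default_len : String) : String :=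
  let lens := pvLenUnitsToTokens units
  let length_head := if lens.headD "" = default_len then "" else lens.headD ""
  let token := note_str ++ length_head ++ PySem.Str.join "" ((lens.drop 1).map (fun tok => "&" ++ tok))
  if tie_out then token ++ "&" else token

-- the inner `for part in parts` total of one rest token in A's loop body
def pvRestTokUnits (tok : String) (default_len : String) : Int :=
  let tail := PySem.Str.slice tok (some 1) none
  -- sep "&" is a nonempty literal, so split? is always `some`; getD [] is exact
  let parts := if tail ≠ "" then (PySem.Str.split? tail "&").getD [] else [""]
  parts.foldl (fun total part => total + pvLenTokenToUnits (if part ≠ "" then part else default_len)) 0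

-- one iteration of A's `for tok in tokens + ["__END__"]`
def pvStepA (default_len : String) (st : List String × Int) (tok : String) : List String × Int :=
  let (merged, rest_units) := st
  if PySem.Str.startswith tok "R" then
    (merged, rest_units + pvRestTokUnits tok default_len)
  else
    let merged := if rest_units ≠ 0 then merged ++ [pvNoteToken "R" rest_units false default_len] else merged
    let merged := if tok ≠ "__END__" then merged ++ [tok] else merged
    (merged, 0)

def merge_rest_tokens_py (tokens : List String) (default_len : String) : List String :=
  ((tokens ++ ["__END__"]).foldl (pvStepA default_len) ([], 0)).1

-- ===== PORT B =====
-- _UNITS: precomputed unit value of every length token (dotted forms included)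
def pvUnits : PySem.Dict String Int :=
  PySem.Dict.ofList [("1", (16 : Int)), ("1.", 24), ("2", 8), ("2.", 12), ("4", 4), ("4.", 6),
                     ("8", 2), ("8.", 3), ("16", 1), ("16.", 1)]

-- _REM: greedy token decomposition of every remainder 0..15
def pvRem : List (List String) :=
  [[], ["16"], ["8"], ["8."], ["4"], ["4", "16"], ["4."], ["4.", "16"],
   ["2"], ["2", "16"], ["2", "8"], ["2", "8."], ["2."], ["2.", "16"],
   ["2.", "8"], ["2.", "8."]]

-- _rest_note: q, r = divmod(total, 16); lens = ["1"]*q + _REM[r]; "R" + "&".join(parts).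
-- _REM[r] has r = total % 16 ∈ [0,16), always in range: pyGet? is always some, getD [] exact;
-- lens[0] via headD "" (called only with total > 0, so lens ≠ [])
def pvRestNote (total : Int) (default_len : String) : String :=
  let lens := List.replicate (PySem.Int.floordiv total 16).toNat "1"
                ++ ((PySem.List.pyGet? pvRem (PySem.Int.mod total 16)).getD [])
  let parts := (if lens.headD "" = default_len then "" else lens.headD "") :: lens.drop 1
  "R" ++ PySem.Str.join "&" parts

-- the `for p in tokens[i][1:].split("&")` accumulation of one rest token
-- (sep "&" is a nonempty literal, so split? is always `some`; getD [] is exact)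
def pvRestTokUnitsB (tok : String) (default_len : String) : Int :=
  ((PySem.Str.split? (PySem.Str.slice tok (some 1) none) "&").getD []).foldl
    (fun total p => total + pvUnits.getD (if p ≠ "" then p else default_len) 0) 0

-- inner `while i < n and tokens[i].startswith("R")`: total units of the leading rest run and the rest
def pvGroupB (default_len : String) : List String → Int × List String
  | [] => (0, [])
  | t :: rest =>
    if PySem.Str.startswith t "R" then
      let g := pvGroupB default_len rest
      (pvRestTokUnitsB t default_len + g.1, g.2)
    else (0, t :: rest)

-- outer `while i < n` loop over the suffix of tokens; fuel (initially tokens.length) only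
-- bounds the number of outer iterations, each of which consumes at least one token
def pvGoB (default_len : String) : Nat → List String → List String
  | _, [] => []
  | 0, _ => []
  | fuel + 1, t :: rest =>
    if ¬ PySem.Str.startswith t "R" then t :: pvGoB default_len fuel rest
    else
      let g := pvGroupB default_len (t :: rest)
      (if g.1 ≠ 0 then [pvRestNote g.1 default_len] else []) ++ pvGoB default_len fuel g.2

def merge_rest_tokens_py_alt (tokens : List String) (default_len : String) : List String :=
  pvGoB default_len tokens.length tokens

-- ===== PRECONDITION & SPEC =====
-- On token lists containing the literal string "__END__", A's internal sentinel collides with the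
-- input: A silently drops that token (flushing pending rests at it), while B keeps it as an
-- ordinary non-rest token, which is the intended behaviour.
def D_merge_rest_tokens_py (tokens : List String) (default_len : String) : Prop := "__END__" ∈ tokens
instance (tokens : List String) (default_len : String) : Decidable (D_merge_rest_tokens_py tokens default_len) := by unfold D_merge_rest_tokens_py; infer_instance

def Spec_merge_rest_tokens_py (tokens : List String) (default_len : String) (out : List String) : Prop := ¬ D_merge_rest_tokens_py tokens default_len → out = merge_rest_tokens_py_alt tokens default_len
instance (tokens : List String) (default_len : String) (out : List String) : Decidable (Spec_merge_rest_tokens_py tokens default_len out) := by unfold Spec_merge_rest_tokens_py; infer_instance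

def pvDiffWitness_merge_rest_tokens_py : List String × String := (["__END__"], "4")
def pvDiffWitnessOut_merge_rest_tokens_py : (List String) × (List String) := ([], ["__END__"])

-- ===== CLAIM (what is proved, stated in full; the proofs are below) =====
def Claim_unchanged_merge_rest_tokens_py : Prop := ∀ (tokens : List String) (default_len : String), Dom_merge_rest_tokens_py tokens default_len → Spec_merge_rest_tokens_py tokens default_len (merge_rest_tokens_py tokens default_len)
def Claim_changed_merge_rest_tokens_py : Prop := Dom_merge_rest_tokens_py (pvDiffWitness_merge_rest_tokens_py.1) (pvDiffWitness_merge_rest_tokens_py.2) ∧ D_merge_rest_tokens_py (pvDiffWitness_merge_rest_tokens_py.1) (pvDiffWitness_merge_rest_tokens_py.2) ∧ merge_rest_tokens_py (pvDiffWitness_merge_rest_tokens_py.1) (pvDiffWitness_merge_rest_tokens_py.2) = pvDiffWitnessOut_merge_rest_tokens_py.1 ∧ merge_rest_tokens_py_alt (pvDiffWitness_merge_rest_tokens_py.1) (pvDiffWitness_merge_rest_tokens_py.2) = pvDiffWitnessOut_merge_rest_tokens_py.2 ∧ pvDiffWitnessOut_merge_rest_tokens_py.1 ≠ pvDiffWi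tnessOut_merge_rest_tokens_py.2

def Claim_exact_merge_rest_tokens_py : Prop := ∀ (tokens : List String) (default_len : String), Dom_merge_rest_tokens_py tokens default_len → D_merge_rest_tokens_py tokens default_len → merge_rest_tokens_py tokens default_len ≠ merge_rest_tokens_py_alt tokens default_len

-- ===== LEMMAS AND PROOFS =====

-- ---- the unit table pvUnits agrees with A's compute-the-dot helper on EVERY string ----

theorem pvBase_getD_zero (c : String) (h1 : c ≠ "1") (h2 : c ≠ "2") (h3 : c ≠ "4")
    (h4 : c ≠ "8") (h5 : c ≠ "16") : pvBase.getD c 0 = 0 := by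
  have hm : pvBase = PySem.Dict.mk [("1", (16 : Int)), ("2", 8), ("4", 4), ("8", 2), ("16", 1)] := by
    decide
  rw [hm, PySem.Dict.getD_eq_get?_getD]
  simp only [PySem.Dict.get?_mk_cons, beq_iff_eq]
  rw [if_neg (Ne.symm h1), if_neg (Ne.symm h2), if_neg (Ne.symm h3), if_neg (Ne.symm h4),
    if_neg (Ne.symm h5)]
  rfl

-- a string ending in "." is its [:-1] slice plus "."
theorem endswith_dot_eq (p : String) (h : PySem.Str.endswith p "." = true) :
    (PySem.Str.slice p none (some (-1))) ++ "." = p := by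
  apply String.toList_inj.mp
  rw [String.toList_append]
  have h2 : ['.'] <:+ p.toList := by
    rw [PySem.Str.endswith_eq] at h
    exact (PySem.Chars.endswith_iff _ _).mp h
  obtain ⟨t, ht⟩ := h2
  rw [PySem.Str.toList_slice]
  simp [PySem.Chars.slice_eq_listSlice, PySem.List.slice_to_neg_one, ← ht]

theorem pvUnits_eq_tok (p : String) : pvUnits.getD p 0 = pvLenTokenToUnits p := by
  by_cases e1 : p = "1"; · subst e1; decide
  by_cases e2 : p = "1."; · subst e2; decide
  by_cases e3 : p = "2"; · subst e3; decide
  by_cases e4 : p = "2."; · subst e4; decide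
  by_cases e5 : p = "4"; · subst e5; decide
  by_cases e6 : p = "4."; · subst e6; decide
  by_cases e7 : p = "8"; · subst e7; decide
  by_cases e8 : p = "8."; · subst e8; decide
  by_cases e9 : p = "16"; · subst e9; decide
  by_cases e10 : p = "16."; · subst e10; decide
  have hB : pvUnits.getD p 0 = 0 := by
    have hm : pvUnits = PySem.Dict.mk [("1", (16 : Int)), ("1.", 24), ("2", 8), ("2.", 12),
        ("4", 4), ("4.", 6), ("8", 2), ("8.", 3), ("16", 1), ("16.", 1)] := by decide
    rw [hm, PySem.Dict.getD_eq_get?_getD]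
    simp only [PySem.Dict.get?_mk_cons, beq_iff_eq]
    rw [if_neg (Ne.symm e1), if_neg (Ne.symm e2), if_neg (Ne.symm e3), if_neg (Ne.symm e4),
      if_neg (Ne.symm e5), if_neg (Ne.symm e6), if_neg (Ne.symm e7), if_neg (Ne.symm e8),
      if_neg (Ne.symm e9), if_neg (Ne.symm e10)]
    rfl
  rw [hB]
  by_cases hp : p = ""
  · subst hp; decide
  simp only [pvLenTokenToUnits, if_neg hp]
  by_cases hd : PySem.Str.endswith p "." = true
  · simp only [hd, if_pos]
    have hsp := endswith_dot_eq p hd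
    have hc : pvBase.getD (PySem.Str.slice p none (some (-1))) 0 = 0 := by
      apply pvBase_getD_zero <;> intro hc <;> rw [hc] at hsp
      · exact e2 hsp.symm
      · exact e4 hsp.symm
      · exact e6 hsp.symm
      · exact e8 hsp.symm
      · exact e10 hsp.symm
    rw [hc]; decide
  · simp only [Bool.not_eq_true] at hd
    simp only [hd, Bool.false_eq_true, if_false]
    exact (pvBase_getD_zero p e1 e3 e5 e7 e9).symm

theorem pvUnits_nonneg (p : String) : 0 ≤ pvUnits.getD p 0 := by
  by_cases e1 : p = "1"; · subst e1; decide
  by_cases e2 : p = "1."; · subst e2; decide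
  by_cases e3 : p = "2"; · subst e3; decide
  by_cases e4 : p = "2."; · subst e4; decide
  by_cases e5 : p = "4"; · subst e5; decide
  by_cases e6 : p = "4."; · subst e6; decide
  by_cases e7 : p = "8"; · subst e7; decide
  by_cases e8 : p = "8."; · subst e8; decide
  by_cases e9 : p = "16"; · subst e9; decide
  by_cases e10 : p = "16."; · subst e10; decide
  have hm : pvUnits = PySem.Dict.mk [("1", (16 : Int)), ("1.", 24), ("2", 8), ("2.", 12),
      ("4", 4), ("4.", 6), ("8", 2), ("8.", 3), ("16", 1), ("16.", 1)] := by decide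
  rw [hm, PySem.Dict.getD_eq_get?_getD]
  simp only [PySem.Dict.get?_mk_cons, beq_iff_eq]
  rw [if_neg (Ne.symm e1), if_neg (Ne.symm e2), if_neg (Ne.symm e3), if_neg (Ne.symm e4),
    if_neg (Ne.symm e5), if_neg (Ne.symm e6), if_neg (Ne.symm e7), if_neg (Ne.symm e8),
    if_neg (Ne.symm e9), if_neg (Ne.symm e10)]
  have hz : (((PySem.Dict.mk ([] : List (String × Int))).get? p).getD 0) = 0 := rfl
  rw [hz]

-- ---- one rest token contributes the same units in both programs ----

theorem pvRestTokUnitsB_eq (tok default_len : String) :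
    pvRestTokUnitsB tok default_len = pvRestTokUnits tok default_len := by
  have hfun : (fun (total : Int) (p : String) =>
        total + pvUnits.getD (if p ≠ "" then p else default_len) 0)
      = (fun (total : Int) (part : String) =>
        total + pvLenTokenToUnits (if part ≠ "" then part else default_len)) := by
    funext total p
    rw [pvUnits_eq_tok]
  unfold pvRestTokUnitsB pvRestTokUnits
  by_cases ht : PySem.Str.slice tok (some 1) none = ""
  · rw [ht]
    simp only [ne_eq, not_true_eq_false, if_false]
    rw [hfun]
    rfl
  · simp only [ne_eq, ht, not_false_eq_true, if_true, hfun]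

theorem pvRestTokUnitsB_nonneg (tok default_len : String) :
    0 ≤ pvRestTokUnitsB tok default_len := by
  unfold pvRestTokUnitsB
  have aux : ∀ (l : List String) (init : Int), 0 ≤ init →
      0 ≤ l.foldl (fun total p => total + pvUnits.getD (if p ≠ "" then p else default_len) 0) init := by
    intro l
    induction l with
    | nil => intro init h; simpa using h
    | cons x t ih =>
      intro init h
      simp only [List.foldl_cons]
      exact ih _ (add_nonneg h (pvUnits_nonneg _))
  exact aux _ 0 le_rfl

-- ---- the closed divmod form equals A's greedy table loop for positive units ----

theorem pvWhileGe_closed (fuel : Nat) :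
    ∀ (r : Int) (toks : List String), 0 ≤ r → r ≤ 16 * fuel →
      pvWhileGe 16 "1" fuel r toks = (toks ++ List.replicate (r / 16).toNat "1", r % 16) := by
  induction fuel with
  | zero =>
    intro r toks h0 h1
    have : r = 0 := by omega
    subst this
    simp [pvWhileGe]
  | succ n ih =>
    intro r toks h0 h1
    simp only [pvWhileGe]
    by_cases h16 : (16 : Int) ≤ r
    · rw [if_pos h16, ih (r - 16) (toks ++ ["1"]) (by omega) (by omega)]
      have hq : (r / 16).toNat = ((r - 16) / 16).toNat + 1 := by omega
      have hm : (r - 16) % 16 = r % 16 := by omega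
      rw [hq, hm, List.replicate_succ]
      simp
    · rw [if_neg h16]
      have hq : (r / 16).toNat = 0 := by omega
      have hm : r % 16 = r := by omega
      rw [hq, hm]
      simp

theorem pvWhileGe_append (u : Int) (t : String) (fuel : Nat) :
    ∀ (r : Int) (toks : List String),
      pvWhileGe u t fuel r toks
        = (toks ++ (pvWhileGe u t fuel r []).1, (pvWhileGe u t fuel r []).2) := by
  induction fuel with
  | zero => intro r toks; simp [pvWhileGe]
  | succ n ih =>
    intro r toks
    by_cases h : u ≤ r
    · simp only [pvWhileGe, if_pos h, List.nil_append]
      rw [ih (r - u) (toks ++ [t]), ih (r - u) [t]]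
      simp
    · simp only [pvWhileGe, if_neg h]
      simp

theorem pvTableGo_append (rows : List (Int × String)) :
    ∀ (r : Int) (toks : List String), pvTableGo rows r toks = toks ++ pvTableGo rows r [] := by
  induction rows with
  | nil => intro r toks; simp [pvTableGo]
  | cons row rest ih =>
    intro r toks
    obtain ⟨u, t⟩ := row
    simp only [pvTableGo]
    rw [pvWhileGe_append u t r.toNat r toks, pvWhileGe_append u t r.toNat r []]
    simp only [List.nil_append]
    by_cases h : (pvWhileGe u t r.toNat r []).2 = 0
    · rw [if_pos h, if_pos h]
    · rw [if_neg h, if_neg h, ih, ih _ (pvWhileGe u t r.toNat r []).1]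
      simp

theorem pvTableGo_cons (u0 : Int) (t0 : String) (rows : List (Int × String)) (r : Int)
    (toks : List String) :
    pvTableGo ((u0, t0) :: rows) r toks
      = if (pvWhileGe u0 t0 r.toNat r toks).2 = 0 then (pvWhileGe u0 t0 r.toNat r toks).1
        else pvTableGo rows (pvWhileGe u0 t0 r.toNat r toks).2 (pvWhileGe u0 t0 r.toNat r toks).1 := by
  simp only [pvTableGo]

theorem pvLensB_eq (u : Int) (hu : 0 < u) :
    List.replicate (PySem.Int.floordiv u 16).toNat "1"
        ++ ((PySem.List.pyGet? pvRem (PySem.Int.mod u 16)).getD [])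
      = pvLenUnitsToTokens u := by
  rw [PySem.Int.floordiv_eq_ediv_of_pos (by norm_num), PySem.Int.mod_eq_emod_of_pos (by norm_num)]
  unfold pvLenUnitsToTokens
  rw [pvTableGo_cons, pvWhileGe_closed u.toNat u [] (by omega) (by omega)]
  simp only [List.nil_append]
  by_cases h0 : u % 16 = 0
  · rw [h0]
    have h1 : ((PySem.List.pyGet? pvRem (0 : Int)).getD []) = [] := by decide
    simp [h1]
  · simp only [if_neg h0]
    rw [pvTableGo_append]
    have hb : 1 ≤ u % 16 ∧ u % 16 ≤ 15 := by omega
    congr 1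
    generalize hr : u % 16 = r at hb h0 ⊢
    obtain ⟨hb1, hb2⟩ := hb
    interval_cases r <;> decide

-- ---- Str.join "&" (h :: t) unfolds to A's head-plus-"&tok" concatenation ----

theorem chars_join_nil_cons (a : List Char) (l : List (List Char)) :
    PySem.Chars.join [] (a :: l) = a ++ PySem.Chars.join [] l := by
  cases l with
  | nil => simp [PySem.Chars.join_singleton, PySem.Chars.join_nil]
  | cons b t => rw [PySem.Chars.join_cons_cons]; simp

theorem chars_join_amp (t : List (List Char)) :
    ∀ (h : List Char),
      PySem.Chars.join ['&'] (h :: t) = h ++ PySem.Chars.join [] (t.map (fun cs => '&' :: cs)) := by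
  induction t with
  | nil => intro h; simp [PySem.Chars.join_singleton, PySem.Chars.join_nil]
  | cons y rest ih =>
    intro h
    rw [PySem.Chars.join_cons_cons, ih y]
    simp only [List.map_cons, chars_join_nil_cons]
    simp

theorem str_join_amp (h : String) (t : List String) :
    PySem.Str.join "&" (h :: t)
      = h ++ PySem.Str.join "" ((t.map (fun tok => "&" ++ tok))) := by
  apply String.toList_inj.mp
  rw [String.toList_append, PySem.Str.toList_join, PySem.Str.toList_join]
  simp only [List.map_cons, List.map_map]
  have : (List.map (String.toList ∘ fun tok => "&" ++ tok) t)
      = (t.map String.toList).map (fun cs => '&' :: cs) := by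
    simp only [List.map_map]
    apply List.map_congr_left
    intro x _
    simp [String.toList_append]
  rw [this]
  exact chars_join_amp (t.map String.toList) h.toList

-- ---- the note builders agree for positive unit totals ----

theorem pvRestNote_eq (u : Int) (default_len : String) (hu : 0 < u) :
    pvRestNote u default_len = pvNoteToken "R" u false default_len := by
  unfold pvRestNote pvNoteToken
  rw [pvLensB_eq u hu]
  simp only [Bool.false_eq_true, if_false]
  rw [str_join_amp]
  rw [← String.append_assoc]

-- ---- the group scan against A's sentinel fold ----

theorem pvGroupB_length_le (default_len : String) (l : List String) :
    (pvGroupB default_len l).2.length ≤ l.length := by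
  induction l with
  | nil => simp [pvGroupB]
  | cons tok rest ih =>
    simp only [pvGroupB]
    split
    · exact Nat.le_succ_of_le ih
    · simp

theorem pvGoB_fuel (default_len : String) :
    ∀ (f1 : Nat) (l : List String) (f2 : Nat), l.length ≤ f1 → l.length ≤ f2 →
      pvGoB default_len f1 l = pvGoB default_len f2 l := by
  intro f1
  induction f1 with
  | zero =>
    intro l f2 h1 _
    have : l = [] := List.eq_nil_of_length_eq_zero (Nat.le_zero.mp h1)
    subst this
    cases f2 <;> rfl
  | succ n ih =>
    intro l f2 h1 h2
    cases l with
    | nil => cases f2 <;> rfl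
    | cons tok rest =>
      cases f2 with
      | zero => simp at h2
      | succ m =>
        have hr1 : rest.length ≤ n := by simp only [List.length_cons] at h1; omega
        have hr2 : rest.length ≤ m := by simp only [List.length_cons] at h2; omega
        simp only [pvGoB]
        by_cases hb : PySem.Str.startswith tok "R" = true
        · rw [if_neg (not_not_intro hb), if_neg (not_not_intro hb)]
          have hle : (pvGroupB default_len (tok :: rest)).2.length ≤ rest.length := by
            have := pvGroupB_length_le default_len rest
            simp only [pvGroupB, if_pos hb]
            omega
          rw [ih (pvGroupB default_len (tok :: rest)).2 m (le_trans hle hr1) (le_trans hle hr2)]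
        · rw [if_pos hb, if_pos hb, ih rest m hr1 hr2]

theorem pvGoB_group (default_len : String) (fuel : Nat) (l : List String) (hf : l.length ≤ fuel) :
    pvGoB default_len fuel l =
      (if (pvGroupB default_len l).1 ≠ 0
        then [pvRestNote (pvGroupB default_len l).1 default_len] else [])
      ++ pvGoB default_len fuel (pvGroupB default_len l).2 := by
  cases l with
  | nil =>
    simp only [pvGroupB]
    cases fuel <;> simp [pvGoB]
  | cons tok rest =>
    cases fuel with
    | zero => simp at hf
    | succ n =>
      have hr : rest.length ≤ n := by simp only [List.length_cons] at hf; omega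
      by_cases hb : PySem.Str.startswith tok "R" = true
      · have hle : (pvGroupB default_len (tok :: rest)).2.length ≤ n := by
          have := pvGroupB_length_le default_len rest
          simp only [pvGroupB, if_pos hb]
          omega
        simp only [pvGoB]
        rw [if_neg (not_not_intro hb)]
        rw [pvGoB_fuel default_len n (pvGroupB default_len (tok :: rest)).2 (n + 1) hle
          (le_trans hle (Nat.le_succ n))]
      · simp only [pvGoB, pvGroupB]
        rw [if_neg hb, if_pos hb]
        simp only [ne_eq, not_true_eq_false, if_false]
        simp only [pvGoB]
        rw [if_pos hb]
        simp

-- A's fold from an arbitrary nonnegative pending-rest state, against B's group scan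
theorem pvFoldA_eq (default_len : String) :
    ∀ (l : List String) (merged : List String) (r : Int) (fuel : Nat),
      "__END__" ∉ l → l.length ≤ fuel → 0 ≤ r →
      ((l ++ ["__END__"]).foldl (pvStepA default_len) (merged, r)).1 =
        merged
        ++ (if r + (pvGroupB default_len l).1 ≠ 0
              then [pvRestNote (r + (pvGroupB default_len l).1) default_len] else [])
        ++ pvGoB default_len fuel (pvGroupB default_len l).2 := by
  intro l
  induction l with
  | nil =>
    intro merged r fuel _ _ hr0
    have hE : ¬ (PySem.Str.startswith "__END__" "R" = true) := by decide
    simp only [List.nil_append, List.foldl_cons, List.foldl_nil, pvStepA, pvGroupB]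
    rw [if_neg hE]
    have h0 : pvGoB default_len fuel [] = [] := by cases fuel <;> rfl
    by_cases hr : r = 0
    · simp [h0, hr]
    · have hpos : 0 < r := by omega
      rw [← pvRestNote_eq r default_len hpos]
      simp [h0, hr]
  | cons tok rest ih =>
    intro merged r fuel hend hf hr0
    have hend' : "__END__" ∉ rest := fun h => hend (List.mem_cons_of_mem _ h)
    have htok : tok ≠ "__END__" := fun h => hend (h ▸ List.mem_cons_self ..)
    have hf' : rest.length ≤ fuel := by simp only [List.length_cons] at hf; omega
    by_cases hb : PySem.Str.startswith tok "R" = true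
    · simp only [List.cons_append, List.foldl_cons, pvStepA]
      rw [if_pos hb]
      rw [ih merged (r + pvRestTokUnits tok default_len) fuel hend' hf'
        (add_nonneg hr0 (pvRestTokUnitsB_eq tok default_len ▸ pvRestTokUnitsB_nonneg tok default_len))]
      simp only [pvGroupB]
      rw [if_pos hb, pvRestTokUnitsB_eq]
      simp [add_assoc]
    · simp only [List.cons_append, List.foldl_cons, pvStepA]
      rw [if_neg hb, if_pos htok]
      rw [ih _ 0 fuel hend' hf' le_rfl]
      simp only [pvGroupB]
      rw [if_neg hb]
      have hrg := pvGoB_group default_len fuel rest hf'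
      cases fuel with
      | zero => simp at hf
      | succ n =>
        have hstep : pvGoB default_len (n + 1) (tok :: rest)
            = tok :: pvGoB default_len (n + 1) rest := by
          simp only [pvGoB]
          rw [if_pos hb,
            pvGoB_fuel default_len n rest (n + 1)
              (by simp only [List.length_cons] at hf; omega) hf']
        rw [hstep, hrg]
        by_cases hr : r = 0
        · by_cases hg : (pvGroupB default_len rest).1 = 0 <;> simp [hr, hg]
        · have hpos : 0 < r := by omega
          rw [← pvRestNote_eq r default_len hpos]
          by_cases hg : (pvGroupB default_len rest).1 = 0 <;> simp [hr, hg]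

-- ---- the sentinel lemmas for the tight claim ----

-- a note token starts with 'R', so it is never the sentinel string (A's builder)
theorem pvNoteToken_ne_end (u : Int) (dl : String) : pvNoteToken "R" u false dl ≠ "__END__" := by
  intro h
  have h' := congrArg String.toList h
  simp only [pvNoteToken, Bool.false_eq_true, if_false, String.toList_append] at h'
  simp at h'

-- A's fold never puts the sentinel into merged
theorem pvFoldA_end_not_mem (default_len : String) :
    ∀ (l : List String) (st : List String × Int), "__END__" ∉ st.1 →
      "__END__" ∉ (l.foldl (pvStepA default_len) st).1 := by
  intro l
  induction l with
  | nil => intro st h _; exact h (by assumption)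
  | cons tok rest ih =>
    intro st h
    apply ih
    obtain ⟨merged, r⟩ := st
    simp only [pvStepA]
    by_cases hb : PySem.Str.startswith tok "R" = true
    · rw [if_pos hb]; exact h
    · rw [if_neg hb]
      by_cases htok : tok = "__END__"
      · rw [if_neg (by simp [htok])]
        by_cases hr : r = 0
        · rw [if_neg (by simp [hr])]
          exact h
        · rw [if_pos hr]
          intro hmem
          rcases List.mem_append.mp hmem with h1 | h1
          · exact h h1
          · exact pvNoteToken_ne_end r default_len (List.mem_singleton.mp h1).symm
      · rw [if_pos htok]
        by_cases hr : r = 0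
        · rw [if_neg (by simp [hr])]
          intro hmem
          rcases List.mem_append.mp hmem with h1 | h1
          · exact h h1
          · exact htok (List.mem_singleton.mp h1).symm
        · rw [if_pos hr]
          intro hmem
          rcases List.mem_append.mp hmem with h1 | h1
          · rcases List.mem_append.mp h1 with h2 | h2
            · exact h h2
            · exact pvNoteToken_ne_end r default_len (List.mem_singleton.mp h2).symm
          · exact htok (List.mem_singleton.mp h1).symm

-- the rest-run scan never consumes the sentinel (it does not start with 'R')
theorem pvGroupB_end_mem (default_len : String) (l : List String)
    (h : "__END__" ∈ l) : "__END__" ∈ (pvGroupB default_len l).2 := by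
  induction l with
  | nil => simp at h
  | cons tok rest ih =>
    simp only [pvGroupB]
    by_cases hb : PySem.Str.startswith tok "R" = true
    · rw [if_pos hb]
      rcases List.mem_cons.mp h with h' | h'
      · exact absurd (h' ▸ hb) (by decide)
      · exact ih h'
    · rw [if_neg hb]; exact h

-- B keeps the sentinel as an ordinary token
theorem pvGoB_end_mem (default_len : String) :
    ∀ (fuel : Nat) (l : List String), l.length ≤ fuel → "__END__" ∈ l →
      "__END__" ∈ pvGoB default_len fuel l := by
  intro fuel
  induction fuel with
  | zero =>
    intro l h1 h2
    have : l = [] := List.eq_nil_of_length_eq_zero (Nat.le_zero.mp h1)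
    subst this; simp at h2
  | succ n ih =>
    intro l h1 h2
    cases l with
    | nil => simp at h2
    | cons tok rest =>
      have hr : rest.length ≤ n := by simp only [List.length_cons] at h1; omega
      simp only [pvGoB]
      by_cases hb : PySem.Str.startswith tok "R" = true
      · rw [if_neg (not_not_intro hb)]
        have htok : tok ≠ "__END__" := fun he => absurd (he ▸ hb) (by decide)
        have hmem : "__END__" ∈ rest := by
          rcases List.mem_cons.mp h2 with h' | h'
          · exact absurd h'.symm htok
          · exact h'
        have hmem2 := pvGroupB_end_mem default_len rest hmem
        have hle : (pvGroupB default_len (tok :: rest)).2.length ≤ n := by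
          have := pvGroupB_length_le default_len rest
          simp only [pvGroupB, if_pos hb]
          omega
        have hmem3 : "__END__" ∈ (pvGroupB default_len (tok :: rest)).2 := by
          simp only [pvGroupB, if_pos hb]
          exact hmem2
        exact List.mem_append_right _ (ih _ hle hmem3)
      · rw [if_pos hb]
        rcases List.mem_cons.mp h2 with h' | h'
        · exact h' ▸ List.mem_cons_self ..
        · exact List.mem_cons_of_mem _ (ih rest hr h')

-- ===== VERDICT (by name: the statement is the Claim_ definition above) =====
theorem merge_rest_tokens_py_spec : Claim_unchanged_merge_rest_tokens_py := by
  intro tokens default_len _ hD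
  show merge_rest_tokens_py tokens default_len = merge_rest_tokens_py_alt tokens default_len
  unfold merge_rest_tokens_py merge_rest_tokens_py_alt
  rw [pvFoldA_eq default_len tokens [] 0 tokens.length hD (le_refl _) le_rfl]
  simp only [zero_add, List.nil_append]
  rw [← pvGoB_group default_len tokens.length tokens (le_refl _)]

theorem merge_rest_tokens_py_changed : Claim_changed_merge_rest_tokens_py := by
  unfold Claim_changed_merge_rest_tokens_py
  refine ⟨by decide, by decide, by decide, ?_, by decide⟩
  decide

theorem merge_rest_tokens_py_tight : Claim_exact_merge_rest_tokens_py := by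
  intro tokens default_len _ hD heq
  have hB : "__END__" ∈ merge_rest_tokens_py_alt tokens default_len :=
    pvGoB_end_mem default_len tokens.length tokens (le_refl _) hD
  have hA : "__END__" ∉ merge_rest_tokens_py tokens default_len :=
    pvFoldA_end_not_mem default_len (tokens ++ ["__END__"]) ([], 0) (by simp)
  exact hA (heq ▸ hB)
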